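-- pv_equiv track=rewrite | github.com/egumasa/engagement-annotation-project | scripts/accuracy_calculator_webano.py | simple_model_2
-- ===== SOURCE A (Python) =====
-- def simple_model_2(sent_to_tag, unam_d, known_d):
--     tagged = []
--     for x in sent_to_tag:
--         word = x["word"]
--         if word in unam_d:  #if the word is unambiguous, assign the tag
--             tagged.append({"word": word, "pos": unam_d[word]})
--         #this is new in model 2:
--         elif word in known_d:
--             tagged.append({"word": word, "pos": known_d[word]})
--         else:  #else, assign tag as "none"
--             tagged.append({"word": word, "pos": "none"})
--
--     return (tagged)
-- ===== SOURCE B (Python) =====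
-- def simple_model_2(sent_to_tag, unam_d, known_d):
--     # Inverted traversal: build a word -> positions index once, then iterate the
--     # dictionaries and scatter their tags into a pre-filled "none" column;
--     # the unambiguous pass runs last so it overrides the known pass.
--     words = [x["word"] for x in sent_to_tag]
--     occ = {}
--     for i, w in enumerate(words):
--         occ.setdefault(w, []).append(i)
--     tags = ["none"] * len(words)
--     for d in (known_d, unam_d):
--         for key, val in d.items():
--             for i in occ.get(key, []):
--                 tags[i] = val
--     return [{"word": w, "pos": t} for w, t in zip(words, tags)]
-- ===== Notes on version B (the rewrite author's own statement) =====
-- stated objective: alternative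
-- what changed: Inverts the traversal: instead of A's per-word loop with two sequential membership/lookup branches, B builds a word->positions occurrence index once, pre-fills every tag with 'none', then iterates over the two dictionaries themselves and scatters their tags into the column by index (known_d pass first, unam_d pass last so it overrides, matching A's elif precedence), finally zipping words with tags.
import Mathlib
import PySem

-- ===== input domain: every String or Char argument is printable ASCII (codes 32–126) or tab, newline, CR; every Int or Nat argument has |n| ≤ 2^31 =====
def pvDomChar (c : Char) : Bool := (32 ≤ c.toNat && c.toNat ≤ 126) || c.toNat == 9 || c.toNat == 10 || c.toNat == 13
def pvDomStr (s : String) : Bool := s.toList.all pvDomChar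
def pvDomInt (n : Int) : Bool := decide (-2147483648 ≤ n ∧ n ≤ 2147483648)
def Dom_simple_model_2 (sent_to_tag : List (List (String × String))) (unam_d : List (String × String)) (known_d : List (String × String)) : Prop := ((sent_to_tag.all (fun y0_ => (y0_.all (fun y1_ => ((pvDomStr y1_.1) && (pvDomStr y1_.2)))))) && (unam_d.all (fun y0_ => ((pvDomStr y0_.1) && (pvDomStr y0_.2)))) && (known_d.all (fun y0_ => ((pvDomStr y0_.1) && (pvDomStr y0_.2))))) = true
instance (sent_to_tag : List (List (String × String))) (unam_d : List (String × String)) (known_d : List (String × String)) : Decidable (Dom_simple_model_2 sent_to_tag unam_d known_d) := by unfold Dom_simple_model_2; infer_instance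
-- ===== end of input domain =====

-- B inverts the traversal: it builds a word -> positions index once, then iterates the two
-- DICTIONARIES and scatters their tags into a pre-filled "none" column (unambiguous pass last,
-- so it overrides), instead of A's per-word branch-and-lookup loop (objective: alternative).

-- ===== PORT A =====
-- literal transliteration: append loop, `word in unam_d` / `unam_d[word]` via Dict.get?
def simple_model_2 (sent_to_tag : List (List (String × String))) (unam_d : List (String × String)) (known_d : List (String × String)) : List (List (String × String)) :=
  sent_to_tag.foldl (fun tagged x =>
    let word := ((PySem.Dict.mk x).get? "word").getD ""   -- x["word"]; none = KeyError, excluded by Pre_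
    match (PySem.Dict.mk unam_d).get? word with
    | some v => tagged ++ [[("word", word), ("pos", v)]]
    | none =>
      match (PySem.Dict.mk known_d).get? word with
      | some v => tagged ++ [[("word", word), ("pos", v)]]
      | none => tagged ++ [[("word", word), ("pos", "none")]]) []

-- ===== PORT B =====
-- Source B step for step: words list, occurrence index (setdefault+append = insert of getD++[i]),
-- tags column pre-filled "none", scatter passes over known_d then unam_d (tags[i] = val → pySetD),
-- final zip into the output dicts.
def simple_model_2_alt (sent_to_tag : List (List (String × String))) (unam_d : List (String × String)) (known_d : List (String × String)) : List (List (String × String)) :=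
  let words := sent_to_tag.map (fun x => ((PySem.Dict.mk x).get? "word").getD "")   -- x["word"]; none = KeyError, excluded by Pre_
  let occ := (PySem.List.enumerate words).foldl
      (fun (d : PySem.Dict String (List Int)) p => d.insert p.2 (d.getD p.2 [] ++ [p.1])) PySem.Dict.empty
  let tags := [known_d, unam_d].foldl (fun tags d =>
      d.foldl (fun tags p =>
        (occ.getD p.1 []).foldl (fun tags i => PySem.List.pySetD tags i p.2) tags) tags)
    (List.replicate words.length "none")
  (words.zip tags).map (fun p => [("word", p.1), ("pos", p.2)])

-- ===== PRECONDITION & SPEC =====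
-- Pre_ excludes (a) sentence elements without a "word" key, on which A raises KeyError, and
-- (b) association lists for unam_d/known_d with duplicate keys, which are not valid Python dicts
-- (a Python dict never has duplicate keys, so (b) excludes no Python-reachable input).
def Pre_simple_model_2 (sent_to_tag : List (List (String × String))) (unam_d : List (String × String)) (known_d : List (String × String)) : Prop :=
  (∀ x ∈ sent_to_tag, "word" ∈ x.map Prod.fst) ∧
  (unam_d.map Prod.fst).Nodup ∧ (known_d.map Prod.fst).Nodup
instance (sent_to_tag : List (List (String × String))) (unam_d : List (String × String)) (known_d : List (String × String)) : Decidable (Pre_simple_model_2 sent_to_tag unam_d known_d) := by unfold Pre_simple_model_2; infer_instance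
def pvWitness_simple_model_2 : (List (List (String × String))) × (List (String × String)) × (List (String × String)) :=
  ([[("word", "a")], [("word", "b")], [("word", "c")]], [("a", "X"), ("b", "Y")], [("b", "Z"), ("c", "W")])

def Spec_simple_model_2 (sent_to_tag : List (List (String × String))) (unam_d : List (String × String)) (known_d : List (String × String)) (out : List (List (String × String))) : Prop := out = simple_model_2_alt sent_to_tag unam_d known_d
instance (sent_to_tag : List (List (String × String))) (unam_d : List (String × String)) (known_d : List (String × String)) (out : List (List (String × String))) : Decidable (Spec_simple_model_2 sent_to_tag unam_d known_d out) := by unfold Spec_simple_model_2; infer_instance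

-- ===== CLAIM (what is proved, stated in full; the proofs are below) =====
def Claim_equal_simple_model_2 : Prop := ∀ (sent_to_tag : List (List (String × String))) (unam_d : List (String × String)) (known_d : List (String × String)), Dom_simple_model_2 sent_to_tag unam_d known_d → Pre_simple_model_2 sent_to_tag unam_d known_d → Spec_simple_model_2 sent_to_tag unam_d known_d (simple_model_2 sent_to_tag unam_d known_d)

-- ===== LEMMAS AND PROOFS =====

-- the value A's loop body appends for one word (proof helper; A's branches verbatim)
def tagA (unam_d known_d : List (String × String)) (x : List (String × String)) : List (String × String) :=
  let word := ((PySem.Dict.mk x).get? "word").getD ""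
  match (PySem.Dict.mk unam_d).get? word with
  | some v => [("word", word), ("pos", v)]
  | none =>
    match (PySem.Dict.mk known_d).get? word with
    | some v => [("word", word), ("pos", v)]
    | none => [("word", word), ("pos", "none")]

-- the occurrence index: its entry at w is the initial entry ++ positions of w, in order
lemma occ_getD (l : List (Int × String)) (d : PySem.Dict String (List Int)) (w : String) :
    (l.foldl (fun d p => d.insert p.2 (d.getD p.2 [] ++ [p.1])) d).getD w []
      = d.getD w [] ++ (l.filter (fun p => p.2 == w)).map Prod.fst := by
  induction l generalizing d with
  | nil => simp
  | cons p rest ih =>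
    rw [List.foldl_cons, ih, PySem.Dict.getD_insert]
    by_cases hw : w = p.2
    · subst hw; simp
    · simp [hw, Ne.symm hw]

-- membership in the index = the word occurs at that position
lemma mem_occ (words : List String) (w : String) (i : Int) :
    (i ∈ ((PySem.List.enumerate words).foldl
        (fun (d : PySem.Dict String (List Int)) p => d.insert p.2 (d.getD p.2 [] ++ [p.1]))
        PySem.Dict.empty).getD w [])
      ↔ ∃ (k : Nat), ∃ _h : k < words.length, i = (k : Int) ∧ words[k] = w := by
  rw [occ_getD]
  simp only [PySem.Dict.getD_empty, List.nil_append, List.mem_map, List.mem_filter]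
  constructor
  · rintro ⟨p, ⟨hp, hw⟩, rfl⟩
    rcases (PySem.List.mem_enumerate_iff words 0 p).1 hp with ⟨k, hk, rfl⟩
    exact ⟨k, hk, by simp, by simpa using hw⟩
  · rintro ⟨k, hk, rfl, hw⟩
    refine ⟨((k : Int), words[k]), ⟨?_, by simpa using hw⟩, rfl⟩
    exact (PySem.List.mem_enumerate_iff words 0 _).2 ⟨k, hk, by simp⟩

-- the inner write loop tags[i] = v: pointwise effect
lemma setfold_getElem? (v : String) (l : List Int) (hnn : ∀ i ∈ l, 0 ≤ i)
    (t : List String) (j : Nat) :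
    (l.foldl (fun t i => PySem.List.pySetD t i v) t)[j]?
      = if (j : Int) ∈ l ∧ j < t.length then some v else t[j]? := by
  induction l generalizing t with
  | nil => simp
  | cons i rest ih =>
    have hi : (0 : Int) ≤ i := hnn i (List.mem_cons_self ..)
    rw [List.foldl_cons, ih (fun x hx => hnn x (List.mem_cons_of_mem _ hx)),
        PySem.List.pySetD_of_nonneg _ _ hi]
    rw [List.length_set, List.getElem?_set]
    by_cases hjt : j < t.length
    · by_cases hji : (j : Int) = i
      · have hij : i.toNat = j := by omega
        by_cases hjr : (j : Int) ∈ rest <;> simp [hij, hji, hjt]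
      · have hij : ¬ i.toNat = j := by omega
        by_cases hjr : (j : Int) ∈ rest <;> simp [hij, hji, hjt]
    · have h1 : t[j]? = none := List.getElem?_eq_none (by omega)
      have hij : i.toNat = j → ¬ i.toNat < t.length := by omega
      by_cases hji : i.toNat = j
      · simp [hji, hjt]
      · simp [hji, hjt]

lemma setfold_length (v : String) (l : List Int) (t : List String) :
    (l.foldl (fun t i => PySem.List.pySetD t i v) t).length = t.length := by
  induction l generalizing t with
  | nil => rfl
  | cons i rest ih => rw [List.foldl_cons, ih, PySem.List.length_pySetD]

lemma scatter_length (occd : PySem.Dict String (List Int)) (d : List (String × String))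
    (t : List String) :
    (d.foldl (fun tags p =>
        (occd.getD p.1 []).foldl (fun tags i => PySem.List.pySetD tags i p.2) tags) t).length
      = t.length := by
  induction d generalizing t with
  | nil => rfl
  | cons p rest ih => rw [List.foldl_cons, ih, setfold_length]

-- one scatter pass over a dict d: position j gets d[words[j]] if present, else keeps its tag
lemma scatter_getElem? (words : List String) (d : List (String × String))
    (hd : (d.map Prod.fst).Nodup) (t : List String) (ht : t.length = words.length)
    (j : Nat) (hj : j < words.length) :
    (d.foldl (fun tags p =>
        (((PySem.List.enumerate words).foldl
            (fun (d : PySem.Dict String (List Int)) p => d.insert p.2 (d.getD p.2 [] ++ [p.1]))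
            PySem.Dict.empty).getD p.1 []).foldl
          (fun tags i => PySem.List.pySetD tags i p.2) tags) t)[j]?
      = match (PySem.Dict.mk d).get? words[j] with
        | some v => some v
        | none => t[j]? := by
  induction d generalizing t with
  | nil => simp [PySem.Dict.get?]
  | cons p rest ih =>
    simp only [List.map_cons, List.nodup_cons] at hd
    rw [List.foldl_cons]
    have hnn : ∀ i ∈ ((PySem.List.enumerate words).foldl
        (fun (d : PySem.Dict String (List Int)) p => d.insert p.2 (d.getD p.2 [] ++ [p.1]))
        PySem.Dict.empty).getD p.1 [], (0:Int) ≤ i := by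
      intro i hi
      rcases (mem_occ words p.1 i).1 hi with ⟨k, _, rfl, _⟩
      exact Int.natCast_nonneg k
    have hlen := setfold_length p.2 (((PySem.List.enumerate words).foldl
        (fun (d : PySem.Dict String (List Int)) p => d.insert p.2 (d.getD p.2 [] ++ [p.1]))
        PySem.Dict.empty).getD p.1 []) t
    rw [ih hd.2 _ (by rw [hlen, ht]), setfold_getElem? _ _ hnn, PySem.Dict.get?_mk_cons]
    by_cases hw : words[j] = p.1
    · have hmem : (j : Int) ∈ ((PySem.List.enumerate words).foldl
          (fun (d : PySem.Dict String (List Int)) p => d.insert p.2 (d.getD p.2 [] ++ [p.1]))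
          PySem.Dict.empty).getD p.1 [] := (mem_occ words p.1 _).2 ⟨j, hj, rfl, hw⟩
      have hnone : (PySem.Dict.mk rest).get? p.1 = none := by
        rw [PySem.Dict.get?_eq_none_iff_not_mem_keys]
        simpa [PySem.Dict.keys] using hd.1
      simp only [hw, hnone, beq_self_eq_true, if_true]
      rw [if_pos ⟨hmem, by omega⟩]
    · have hmem : ¬ (j : Int) ∈ ((PySem.List.enumerate words).foldl
          (fun (d : PySem.Dict String (List Int)) p => d.insert p.2 (d.getD p.2 [] ++ [p.1]))
          PySem.Dict.empty).getD p.1 [] := by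
        intro h
        rcases (mem_occ words p.1 _).1 h with ⟨k, _, hk, hkw⟩
        have : k = j := by omega
        exact hw (this ▸ hkw)
      have hne : ¬ (p.1 == words[j]) = true := fun h => hw ((beq_iff_eq.mp h).symm)
      rw [if_neg hne, if_neg (fun h => hmem h.1)]

theorem simple_model_2_spec : Claim_equal_simple_model_2 := by
  intro sent u k _ hpre
  unfold Spec_simple_model_2 simple_model_2 simple_model_2_alt
  -- A's loop is a map of its body
  have hstep : (fun (tagged : List (List (String × String))) (x : List (String × String)) =>
      let word := ((PySem.Dict.mk x).get? "word").getD ""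
      match (PySem.Dict.mk u).get? word with
      | some v => tagged ++ [[("word", word), ("pos", v)]]
      | none =>
        match (PySem.Dict.mk k).get? word with
        | some v => tagged ++ [[("word", word), ("pos", v)]]
        | none => tagged ++ [[("word", word), ("pos", "none")]])
      = fun tagged x => tagged ++ [tagA u k x] := by
    funext tagged x
    simp only [tagA]
    rcases (PySem.Dict.mk u).get? (((PySem.Dict.mk x).get? "word").getD "") with _ | v
    · rcases (PySem.Dict.mk k).get? (((PySem.Dict.mk x).get? "word").getD "") with _ | v <;> rfl
    · rfl
  rw [hstep, PySem.List.foldl_append_singleton_eq_map]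
  simp only [List.nil_append, List.foldl_cons, List.foldl_nil]
  set words := sent.map (fun x => ((PySem.Dict.mk x).get? "word").getD "") with hwords
  have hwlen : words.length = sent.length := by simp [hwords]
  -- the tags column after both scatter passes
  set tagsK := k.foldl (fun tags p =>
      (((PySem.List.enumerate words).foldl
          (fun (d : PySem.Dict String (List Int)) p => d.insert p.2 (d.getD p.2 [] ++ [p.1]))
          PySem.Dict.empty).getD p.1 []).foldl
        (fun tags i => PySem.List.pySetD tags i p.2) tags) (List.replicate words.length "none") with htagsK
  have hlenK : tagsK.length = words.length := by
    rw [htagsK, scatter_length]; simp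
  set tags := u.foldl (fun tags p =>
      (((PySem.List.enumerate words).foldl
          (fun (d : PySem.Dict String (List Int)) p => d.insert p.2 (d.getD p.2 [] ++ [p.1]))
          PySem.Dict.empty).getD p.1 []).foldl
        (fun tags i => PySem.List.pySetD tags i p.2) tags) tagsK with htags
  have hlen : tags.length = words.length := by
    rw [htags, scatter_length]; exact hlenK
  -- pointwise value of the tags column
  have htagval : ∀ (j : Nat) (hj : j < words.length),
      tags[j]? = some (match (PySem.Dict.mk u).get? words[j] with
        | some v => v
        | none =>
          match (PySem.Dict.mk k).get? words[j] with
          | some v => v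
          | none => "none") := by
    intro j hj
    rw [htags, scatter_getElem? words u hpre.2.1 tagsK hlenK j hj,
        htagsK, scatter_getElem? words k hpre.2.2 _ (by simp) j hj]
    rcases (PySem.Dict.mk u).get? words[j] with _ | v
    · rcases (PySem.Dict.mk k).get? words[j] with _ | v
      · simp [hj]
      · rfl
    · rfl
  -- both sides elementwise
  apply List.ext_getElem
  · simp [hwlen, hlen]
  intro j hj1 hj2
  have hjs : j < sent.length := by simpa using hj1
  have hjw : j < words.length := by omega
  have hA : (sent.map (tagA u k))[j]'hj1 = tagA u k (sent[j]'hjs) := by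
    simp
  rw [hA]
  have hB : ((words.zip tags).map (fun p => [("word", p.1), ("pos", p.2)]))[j]
      = [("word", words[j]'hjw), ("pos", tags[j]'(by omega))] := by
    simp
  rw [hB]
  have hw_j : words[j]'hjw = ((PySem.Dict.mk (sent[j]'hjs)).get? "word").getD "" := by
    simp [hwords]
  have := htagval j hjw
  rw [List.getElem?_eq_getElem (by omega)] at this
  have htj : tags[j]'(by omega) = (match (PySem.Dict.mk u).get? words[j] with
        | some v => v
        | none =>
          match (PySem.Dict.mk k).get? words[j] with
          | some v => v
          | none => "none") := Option.some.inj this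
  rw [htj, hw_j]
  simp only [tagA]
  rcases (PySem.Dict.mk u).get? (((PySem.Dict.mk (sent[j]'hjs)).get? "word").getD "") with _ | v
  · rcases (PySem.Dict.mk k).get? (((PySem.Dict.mk (sent[j]'hjs)).get? "word").getD "") with _ | v <;> rfl
  · rfl
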